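-- pv_equiv track=rewrite | github.com/T1323/Project_Euler | problem36.py | appendReverse
-- ===== SOURCE A (Python) =====
-- def appendReverse(input, mode):
--     number = input
--     if mode == 1:
--         input = (input << 1) | 0x0
--     elif mode == 2:
--         input = (input << 1) | 0x1
--
--     while (number != 0):
--         input = (input << 1) | (number % 2)
--         number >>= 1
--     return input
-- ===== SOURCE B (Python) =====
-- def appendReverse(input, mode):
--     bits = bin(input)[2:] if input else ''
--     mid = '1' if mode == 2 else ('0' if mode == 1 else '')
--     s = bits + mid + bits[::-1]
--     return int(s, 2) if s else 0
-- ===== Notes on version B (the rewrite author's own statement) =====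
-- stated objective: idiomatic
-- what changed: B builds the binary string bits+mid+reversed(bits) and parses it with int(s,2) instead of A's LSB-first shift-and-or bit loop.
import Mathlib
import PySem

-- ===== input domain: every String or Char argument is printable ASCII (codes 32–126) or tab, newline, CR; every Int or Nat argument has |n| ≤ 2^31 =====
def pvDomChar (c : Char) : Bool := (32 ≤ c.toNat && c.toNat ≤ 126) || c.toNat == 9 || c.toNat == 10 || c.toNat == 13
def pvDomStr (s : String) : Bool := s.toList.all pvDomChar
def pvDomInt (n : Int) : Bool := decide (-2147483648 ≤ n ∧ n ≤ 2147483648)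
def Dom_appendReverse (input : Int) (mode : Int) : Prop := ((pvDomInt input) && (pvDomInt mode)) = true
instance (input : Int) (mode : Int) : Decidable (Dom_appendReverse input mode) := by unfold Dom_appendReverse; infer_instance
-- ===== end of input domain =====

-- B builds the binary string bits+mid+reversed(bits) and parses it with int(s,2), replacing A's
-- LSB-first shift-and-or bit loop. Equivalence proved on Pre_ (input ≥ 0; A never returns on negatives).

-- ===== PORT A =====
-- A's while loop: on Pre_ (input ≥ 0) 'number' stays nonnegative, so the loop state is carried as a Nat;
-- (input << 1) | b with 0 ≤ input and b ∈ {0,1} is 2*input + b, exact on Pre_.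
def arLoopA (number : Nat) (input : Int) : Int :=
  if number = 0 then input
  else arLoopA (number / 2) (input * 2 + (number % 2 : Nat))
decreasing_by exact Nat.div_lt_self (Nat.pos_of_ne_zero (by assumption)) (by norm_num)

def appendReverse (input : Int) (mode : Int) : Int :=
  let number := input
  let input := if mode = 1 then input * 2 else if mode = 2 then input * 2 + 1 else input
  arLoopA number.toNat input

-- ===== PORT B =====
-- bin(n)[2:] for n ≥ 0 (empty for 0): built MSB-first, exact on Pre_.
def arBits (n : Nat) : List Char :=
  if n = 0 then [] else arBits (n / 2) ++ [if n % 2 = 1 then '1' else '0']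
decreasing_by exact Nat.div_lt_self (Nat.pos_of_ne_zero (by assumption)) (by norm_num)

-- int(s, 2) on a string of '0'/'1' chars
def arParse (s : List Char) (acc : Int) : Int :=
  match s with
  | [] => acc
  | c :: cs => arParse cs (acc * 2 + (if c = '1' then 1 else 0))

def appendReverse_alt (input : Int) (mode : Int) : Int :=
  let bits := if input = 0 then [] else arBits input.toNat
  let mid : List Char := if mode = 2 then ['1'] else if mode = 1 then ['0'] else []
  let s := bits ++ mid ++ bits.reverse
  if s = [] then 0 else arParse s 0

-- ===== PRECONDITION & SPEC =====
-- Pre_ excludes negative input: there A's while loop never terminates (number >>= 1 converges to -1), so A never returns.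
def Pre_appendReverse (input : Int) (mode : Int) : Prop := 0 ≤ input
instance (input : Int) (mode : Int) : Decidable (Pre_appendReverse input mode) := by unfold Pre_appendReverse; infer_instance
def pvWitness_appendReverse : Int × Int := (5, 1)

def Spec_appendReverse (input : Int) (mode : Int) (out : Int) : Prop := out = appendReverse_alt input mode
instance (input : Int) (mode : Int) (out : Int) : Decidable (Spec_appendReverse input mode out) := by unfold Spec_appendReverse; infer_instance

-- ===== CLAIM (what is proved, stated in full; the proofs are below) =====
def Claim_equal_appendReverse : Prop := ∀ (input : Int) (mode : Int), Dom_appendReverse input mode → Pre_appendReverse input mode → Spec_appendReverse input mode (appendReverse input mode)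

-- ===== LEMMAS AND PROOFS =====

theorem arParse_append (xs ys : List Char) (acc : Int) :
    arParse (xs ++ ys) acc = arParse ys (arParse xs acc) := by
  induction xs generalizing acc with
  | nil => rfl
  | cons c cs ih => simp [arParse, ih]

-- parsing the MSB-first bits of n from acc = 0 recovers n
theorem arParse_bits (n : Nat) : arParse (arBits n) 0 = (n : Int) := by
  induction n using Nat.strong_induction_on with
  | _ n ih =>
    by_cases h : n = 0
    · subst h; simp [arBits, arParse]
    · rw [arBits, if_neg h, arParse_append,
        ih (n / 2) (Nat.div_lt_self (Nat.pos_of_ne_zero h) (by norm_num))]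
      have h2 : n % 2 = 0 ∨ n % 2 = 1 := Nat.mod_two_eq_zero_or_one n
      have hn : n = 2 * (n / 2) + n % 2 := (Nat.div_add_mod n 2).symm ▸ by omega
      rcases h2 with h2 | h2 <;> simp [arParse, h2] <;> omega

-- A's loop is parsing the reversed bit string
theorem arLoopA_eq_parse (n : Nat) (acc : Int) :
    arLoopA n acc = arParse (arBits n).reverse acc := by
  induction n using Nat.strong_induction_on generalizing acc with
  | _ n ih =>
    by_cases h : n = 0
    · subst h; simp [arLoopA, arBits, arParse]
    · rw [arLoopA, if_neg h, arBits, if_neg h,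
        ih (n / 2) (Nat.div_lt_self (Nat.pos_of_ne_zero h) (by norm_num))]
      have h2 : n % 2 = 0 ∨ n % 2 = 1 := Nat.mod_two_eq_zero_or_one n
      rcases h2 with h2 | h2 <;> simp [arParse, h2]

-- ===== VERDICT (by name: the statement is the Claim_ definition above) =====
theorem appendReverse_spec : Claim_equal_appendReverse := by
  intro input mode _ hpre
  unfold Spec_appendReverse appendReverse appendReverse_alt
  have hnn : 0 ≤ input := hpre
  set n := input.toNat with hn
  have hin : (n : Int) = input := Int.toNat_of_nonneg hnn
  simp only
  by_cases h0 : input = 0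
  · subst h0
    by_cases hm1 : mode = 1
    · simp [hm1, arLoopA, arParse]
    · by_cases hm2 : mode = 2
      · simp [hm2, arLoopA, arParse]
      · simp [hm1, hm2, arLoopA, arBits]
  · have hb0 : arBits n ≠ [] := by
      rw [arBits]
      have : n ≠ 0 := by omega
      simp [this]
    rw [if_neg h0]
    have hsne : ∀ mid : List Char, (arBits n ++ mid ++ (arBits n).reverse) ≠ [] := by
      intro mid hcontra
      simp at hcontra
      exact hb0 hcontra.1
    have hkey : ∀ acc : Int, arLoopA n acc = arParse ((arBits n).reverse) acc :=
      fun acc => arLoopA_eq_parse n acc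
    by_cases hm1 : mode = 1
    · rw [hm1]
      simp only [ite_true, if_neg (by norm_num : (1:Int) ≠ 2)]
      rw [if_neg (hsne ['0']), arParse_append, arParse_append, arParse_bits, hin, hkey]
      simp [arParse]
    · by_cases hm2 : mode = 2
      · rw [hm2]
        simp only [if_neg (by norm_num : (2:Int) ≠ 1), ite_true]
        rw [if_neg (hsne ['1']), arParse_append, arParse_append, arParse_bits, hin, hkey]
        simp [arParse]
      · rw [if_neg hm1, if_neg hm2]
        simp only [if_neg hm2, if_neg hm1]
        rw [if_neg (hsne []), arParse_append, arParse_append, arParse_bits, hin, hkey]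
        simp [arParse]
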